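-- pv_equiv track=rewrite | github.com/krab11/code | python/problems/elements_which_have_at-least_two_greater_elements.py | solve
-- ===== SOURCE A (Python) =====
-- def solve(A):
--     great1 = max(A[0], A[1])
--     great2 = min(A[0], A[1])
--     for each in A[2:]:
--         if each > great1:
--             great2 = great1
--             great1 = each
--         elif each > great2:
--             great2 = each
--     B = []
--     for each in A:
--         if each not in [great1, great2]:
--             B.append(each)
--     return B
-- ===== SOURCE B (Python) =====
-- def solve(A):
--     # Threshold formulation: the kept elements are exactly those strictly below the
--     # second-largest value (duplicates counted), computed from max/count passes.
--     m = max(A)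
--     if A.count(m) >= 2:
--         t = m
--     else:
--         t = max(x for x in A if x != m)
--     return [x for x in A if x < t]
-- ===== Notes on version B (the rewrite author's own statement) =====
-- stated objective: alternative
-- what changed: B replaces A's single-pass two-maximum pair tracking plus membership filter by computing the second-largest value t via max/count passes (t = max(A) if it occurs twice, else the max of the remaining values) and keeping exactly the elements strictly below t.
import Mathlib
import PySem

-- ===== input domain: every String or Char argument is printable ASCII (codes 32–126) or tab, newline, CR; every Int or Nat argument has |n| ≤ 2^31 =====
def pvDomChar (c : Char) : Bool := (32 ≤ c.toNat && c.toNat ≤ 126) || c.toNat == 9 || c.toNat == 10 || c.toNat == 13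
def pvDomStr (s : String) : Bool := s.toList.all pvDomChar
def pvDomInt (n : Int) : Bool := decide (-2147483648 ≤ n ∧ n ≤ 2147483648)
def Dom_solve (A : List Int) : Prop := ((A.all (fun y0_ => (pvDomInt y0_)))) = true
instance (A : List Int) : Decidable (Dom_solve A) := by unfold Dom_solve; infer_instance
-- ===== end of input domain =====

-- B computes the second-largest value t (duplicates counted) via max/count passes and keeps the
-- elements strictly below t; A's two-maximum pair-tracking state disappears.  Equivalence of
-- return values is proved on lists of length ≥ 2 (both programs raise below that).

-- ===== PORT A =====
def solve (A : List Int) : List Int :=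
  match A with
  | a0 :: a1 :: _ =>
      let great1 := max a0 a1
      let great2 := min a0 a1
      let g := (PySem.List.slice A (some 2) none).foldl
        (fun (g : Int × Int) each =>
          if g.1 < each then (each, g.1)
          else if g.2 < each then (g.1, each)
          else g) (great1, great2)
      A.foldl (fun B each => if ¬ (each = g.1 ∨ each = g.2) then B ++ [each] else B) []
  | _ => []   -- A[0] / A[1] raise IndexError here; excluded by Pre_solve

-- ===== PORT B =====
def solve_alt (A : List Int) : List Int :=
  match PySem.List.max? A (fun x => x) with
  | none => []          -- max([]) raises ValueError; outside Pre_solve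
  | some m =>
    match (if 2 ≤ PySem.List.count A m then some m
           else PySem.List.max? (A.filter (fun x => !(x == m))) (fun x => x)) with
    | none => []        -- max() of an empty generator raises ValueError; outside Pre_solve
    | some t => A.filter (fun x => decide (x < t))

-- ===== PRECONDITION & SPEC =====
-- A evaluates A[0] and A[1] unconditionally, raising IndexError on lists of length < 2
-- (B raises ValueError there too).
def Pre_solve (A : List Int) : Prop := 2 ≤ A.length
instance (A : List Int) : Decidable (Pre_solve A) := by unfold Pre_solve; infer_instance
def pvWitness_solve : List Int := [1, 2, 3]

def Spec_solve (A : List Int) (out : List Int) : Prop := out = solve_alt A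
instance (A : List Int) (out : List Int) : Decidable (Spec_solve A out) := by unfold Spec_solve; infer_instance

-- ===== CLAIM (what is proved, stated in full; the proofs are below) =====
def Claim_equal_solve : Prop := ∀ (A : List Int), Dom_solve A → Pre_solve A → Spec_solve A (solve A)

-- ===== LEMMAS AND PROOFS =====

-- Invariant of A's two-maximum loop over the processed prefix p:
-- both components occur in p, g.1 is the maximum, at most one element exceeds g.2,
-- and at least two elements are ≥ g.2.
def TwoMaxInv (p : List Int) (g : Int × Int) : Prop :=
  g.2 ≤ g.1 ∧ g.1 ∈ p ∧ g.2 ∈ p ∧ (∀ y ∈ p, y ≤ g.1) ∧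
  p.countP (fun y => decide (g.2 < y)) ≤ 1 ∧ 2 ≤ p.countP (fun y => decide (g.2 ≤ y))

lemma one_le_countP {l : List Int} {a : Int} {p : Int → Bool}
    (ha : a ∈ l) (hpa : p a = true) : 1 ≤ l.countP p :=
  List.countP_pos_iff.mpr ⟨a, ha, hpa⟩

lemma two_le_countP {l : List Int} {a b : Int} {p : Int → Bool}
    (ha : a ∈ l) (hb : b ∈ l) (hne : a ≠ b) (hpa : p a = true) (hpb : p b = true) :
    2 ≤ l.countP p := by
  induction l with
  | nil => simp at ha
  | cons c cs ih =>
    simp only [List.countP_cons]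
    rcases List.mem_cons.mp ha with rfl | ha'
    · have hb' : b ∈ cs := by
        rcases List.mem_cons.mp hb with h | h
        · exact absurd h.symm hne
        · exact h
      have h1 := one_le_countP hb' hpb
      simp only [hpa, if_pos]
      omega
    · rcases List.mem_cons.mp hb with rfl | hb'
      · have h1 := one_le_countP ha' hpa
        simp only [hpb, if_pos]
        omega
      · have h2 := ih ha' hb'
        split <;> omega

lemma step_one (p : List Int) (x : Int) (g : Int × Int) (h : TwoMaxInv p g) :
    TwoMaxInv (p ++ [x])
      (if g.1 < x then (x, g.1) else if g.2 < x then (g.1, x) else g) := by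
  obtain ⟨hle, hmem1, hmem2, hub, hcnt1, hcnt2⟩ := h
  by_cases h1 : g.1 < x
  · simp only [if_pos h1]
    refine ⟨le_of_lt h1, by simp, by simp [hmem1], ?_, ?_, ?_⟩
    · intro y hy
      rcases List.mem_append.mp hy with hy | hy
      · exact le_of_lt (lt_of_le_of_lt (hub y hy) h1)
      · simp at hy; omega
    · have hz : p.countP (fun y => decide (g.1 < y)) = 0 :=
        List.countP_eq_zero.mpr (by intro y hy; simpa using not_lt.mpr (hub y hy))
      simp only [List.countP_append, List.countP_cons, List.countP_nil, hz]
      simp [h1]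
    · have h1' := one_le_countP hmem1 (p := fun y => decide (g.1 ≤ y)) (by simp)
      simp only [List.countP_append, List.countP_cons, List.countP_nil]
      simp only [decide_eq_true_eq]
      rw [if_pos (le_of_lt h1)]
      omega
  · by_cases h2 : g.2 < x
    · simp only [if_neg h1, if_pos h2]
      have hxle : x ≤ g.1 := not_lt.mp h1
      refine ⟨hxle, by simp [hmem1], by simp, ?_, ?_, ?_⟩
      · intro y hy
        rcases List.mem_append.mp hy with hy | hy
        · exact hub y hy
        · simp at hy; omega
      · have hmono : p.countP (fun y => decide (x < y)) ≤ p.countP (fun y => decide (g.2 < y)) :=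
          List.countP_mono_left (by intro y _ hy; simp at hy ⊢; omega)
        simp only [List.countP_append, List.countP_cons, List.countP_nil]
        simp only [decide_eq_true_eq]
        rw [if_neg (lt_irrefl x)]
        omega
      · have h1' := one_le_countP hmem1 (p := fun y => decide (x ≤ y)) (by simp [hxle])
        simp only [List.countP_append, List.countP_cons, List.countP_nil]
        simp only [decide_eq_true_eq]
        rw [if_pos (le_refl x)]
        omega
    · simp only [if_neg h1, if_neg h2]
      have hx2 : x ≤ g.2 := not_lt.mp h2
      refine ⟨hle, by simp [hmem1], by simp [hmem2], ?_, ?_, ?_⟩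
      · intro y hy
        rcases List.mem_append.mp hy with hy | hy
        · exact hub y hy
        · simp at hy; omega
      · simp only [List.countP_append, List.countP_cons, List.countP_nil]
        simp only [decide_eq_true_eq]
        rw [if_neg (not_lt.mpr hx2)]
        omega
      · simp only [List.countP_append, List.countP_cons, List.countP_nil]
        omega

lemma fold_inv (rest : List Int) : ∀ (p : List Int) (g : Int × Int), TwoMaxInv p g →
    TwoMaxInv (p ++ rest)
      (rest.foldl (fun (g : Int × Int) each =>
        if g.1 < each then (each, g.1)
        else if g.2 < each then (g.1, each)
        else g) g) := by
  induction rest with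
  | nil => intro p g h; simpa using h
  | cons x rs ih =>
    intro p g h
    have h2 := ih (p ++ [x]) _ (step_one p x g h)
    simpa using h2

lemma inv_init (a0 a1 : Int) : TwoMaxInv [a0, a1] (max a0 a1, min a0 a1) := by
  rcases le_total a0 a1 with h | h
  · simp only [TwoMaxInv, max_eq_right h, min_eq_left h, List.countP_cons, List.countP_nil]
    refine ⟨h, by simp, by simp, by intro y hy; simp at hy; rcases hy with rfl | rfl <;> omega, ?_, ?_⟩
    <;> simp <;> split_ifs <;> omega
  · simp only [TwoMaxInv, max_eq_left h, min_eq_right h, List.countP_cons, List.countP_nil]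
    refine ⟨h, by simp, by simp, by intro y hy; simp at hy; rcases hy with rfl | rfl <;> omega, ?_, ?_⟩
    <;> simp <;> split_ifs <;> omega

-- an element of A other than g.1 and g.2 lies strictly below g.2
lemma pointwise (A : List Int) (g : Int × Int) (h : TwoMaxInv A g) (x : Int) (hx : x ∈ A) :
    (¬ (x = g.1 ∨ x = g.2)) ↔ x < g.2 := by
  obtain ⟨hle, hmem1, hmem2, hub, hcnt1, hcnt2⟩ := h
  constructor
  · intro hne
    rw [not_or] at hne
    obtain ⟨hne1, hne2⟩ := hne
    rcases lt_trichotomy x g.2 with hlt | heq | hgt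
    · exact hlt
    · exact absurd heq hne2
    · -- g.2 < x ≤ g.1 and x ≠ g.1 : both x and g.1 exceed g.2, contradicting hcnt1
      have h2 : 2 ≤ A.countP (fun y => decide (g.2 < y)) :=
        two_le_countP hx hmem1 hne1 (by simpa using hgt)
          (by simp; exact lt_of_lt_of_le hgt (hub x hx))
      omega
  · intro hlt hor
    rcases hor with rfl | rfl
    · omega
    · omega

lemma max?_eq_top (A : List Int) (g : Int × Int) (h : TwoMaxInv A g) :
    PySem.List.max? A (fun x => x) = some g.1 := by
  obtain ⟨hle, hmem1, hmem2, hub, hcnt1, hcnt2⟩ := h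
  cases heq : PySem.List.max? A (fun x => x) with
  | none =>
    rw [PySem.List.max?_eq_none_iff] at heq
    rw [heq] at hmem1
    simp at hmem1
  | some m =>
    have hm : m ∈ A := PySem.List.max?_mem heq
    have hmax := PySem.List.max?_isMax heq
    have : m = g.1 := le_antisymm (hub m hm) (hmax g.1 hmem1)
    rw [this]

-- ===== VERDICT (by name: the statement is the Claim_ definition above) =====
theorem solve_spec : Claim_equal_solve := by
  intro A _ hpre
  unfold Spec_solve
  match A, hpre with
  | a0 :: a1 :: rest, _ =>
    unfold solve solve_alt
    simp only []
    have hslice : PySem.List.slice (a0 :: a1 :: rest) (some 2) none = rest := by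
      rw [PySem.List.slice_from]
      · rfl
      · norm_num
    rw [hslice]
    have hinv := fold_inv rest [a0, a1] _ (inv_init a0 a1)
    have hA : ([a0, a1] : List Int) ++ rest = a0 :: a1 :: rest := rfl
    rw [hA] at hinv
    set A := a0 :: a1 :: rest with hAdef
    set g := (rest.foldl
      (fun (g : Int × Int) each =>
        if g.1 < each then (each, g.1)
        else if g.2 < each then (g.1, each)
        else g) (max a0 a1, min a0 a1)) with hgdef
    rw [PySem.List.foldl_append_ite_eq_filter, List.nil_append]
    rw [max?_eq_top A g hinv]
    dsimp only
    obtain ⟨hle, hmem1, hmem2, hub, hcnt1, hcnt2⟩ := hinv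
    by_cases hc : 2 ≤ PySem.List.count A g.1
    · rw [if_pos hc]
      -- the maximum occurs at least twice, so A's second maximum equals it
      have hgg : g.2 = g.1 := by
        by_contra hne
        have hlt : g.2 < g.1 := lt_of_le_of_ne hle hne
        rw [PySem.List.count_eq] at hc
        rw [List.count_eq_countP] at hc
        have hmono : A.countP (fun y => y == g.1) ≤ A.countP (fun y => decide (g.2 < y)) :=
          List.countP_mono_left (by intro y _ hy; simp at hy ⊢; omega)
        omega
      apply List.filter_congr
      intro x hx
      rw [decide_eq_decide]
      rw [pointwise A g ⟨hle, hmem1, hmem2, hub, hcnt1, hcnt2⟩ x hx, hgg]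
    · rw [if_neg hc]
      -- the maximum is unique, so A's second maximum is the max of the remaining elements
      have hne21 : g.2 ≠ g.1 := by
        intro he
        rw [PySem.List.count_eq, List.count_eq_countP] at hc
        have hmono : A.countP (fun y => decide (g.2 ≤ y)) ≤ A.countP (fun y => y == g.1) :=
          List.countP_mono_left (by
            intro y hy hle2
            simp at hle2 ⊢
            have := hub y hy
            omega)
        omega
      have hmemf : g.2 ∈ A.filter (fun x => !(x == g.1)) :=
        List.mem_filter.mpr ⟨hmem2, by simpa using hne21⟩
      cases heq : PySem.List.max? (A.filter (fun x => !(x == g.1))) (fun x => x) with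
      | none =>
        rw [PySem.List.max?_eq_none_iff] at heq
        rw [heq] at hmemf
        simp at hmemf
      | some t =>
        have htf : t ∈ A.filter (fun x => !(x == g.1)) := PySem.List.max?_mem heq
        have htA : t ∈ A := (List.mem_filter.mp htf).1
        have htne : t ≠ g.1 := by simpa using (List.mem_filter.mp htf).2
        have hge : g.2 ≤ t := PySem.List.max?_isMax heq g.2 hmemf
        have hle2 : t ≤ g.2 := by
          by_contra hgt
          rw [not_le] at hgt
          have h2 : 2 ≤ A.countP (fun y => decide (g.2 < y)) :=
            two_le_countP htA hmem1 htne (by simpa using hgt)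
              (by simp; exact lt_of_lt_of_le hgt (hub t htA))
          omega
        have ht2 : t = g.2 := le_antisymm hle2 hge
        apply List.filter_congr
        intro x hx
        rw [decide_eq_decide]
        rw [pointwise A g ⟨hle, hmem1, hmem2, hub, hcnt1, hcnt2⟩ x hx, ht2]
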